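-- pv_equiv track=rewrite | github.com/ScoobySatiacum/AoC2023 | day3/day3.py | generate_number_map
-- ===== SOURCE A (Python) =====
-- def generate_number_map(inputs):
--     numbers = {}
--     # iterate rows
--     for i in range(len(inputs)):
--         # iterate chars in row, columns
--         number = ''
--         number_coords = []
--         for j in range(len(inputs[i])):
--             if inputs[i][j].isdigit():
--                 number += inputs[i][j]
--                 number_coords.append((i, j))
--             elif inputs[i][j] == '.':
--                 if number != '':
--                     # number has ended.
--                     for coord in number_coords:
--                         numbers[coord] = number
--                     number = ''
--                     number_coords = []
--             else:
--                 if number != '':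
--                     # number has ended.
--                     for coord in number_coords:
--                         numbers[coord] = number
--                     number = ''
--                     number_coords = []
--         if number != '':
--             # number has ended.
--             for coord in number_coords:
--                 numbers[coord] = number
--             number = ''
--             number_coords = []
--
--     return numbers
-- ===== SOURCE B (Python) =====
-- def generate_number_map(inputs):
--     # Span scan: find each maximal run of digits, slice it out, and map
--     # every column of the run to the sliced number string.
--     numbers = {}
--     for i, row in enumerate(inputs):
--         n = len(row)
--         j = 0
--         while j < n:
--             if row[j].isdigit():
--                 k = j
--                 while k < n and row[k].isdigit():
--                     k += 1
--                 number = row[j:k]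
--                 for c in range(j, k):
--                     numbers[(i, c)] = number
--                 j = k
--             else:
--                 j += 1
--     return numbers
-- ===== Notes on version B (the rewrite author's own statement) =====
-- stated objective: simpler
-- what changed: Replaces A's accumulate-and-flush state machine (pending number string, pending coordinate list, flush duplicated in three places) with a single span scan that finds each maximal digit run, slices it out as the number, and maps each of its columns to it.
import Mathlib
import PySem

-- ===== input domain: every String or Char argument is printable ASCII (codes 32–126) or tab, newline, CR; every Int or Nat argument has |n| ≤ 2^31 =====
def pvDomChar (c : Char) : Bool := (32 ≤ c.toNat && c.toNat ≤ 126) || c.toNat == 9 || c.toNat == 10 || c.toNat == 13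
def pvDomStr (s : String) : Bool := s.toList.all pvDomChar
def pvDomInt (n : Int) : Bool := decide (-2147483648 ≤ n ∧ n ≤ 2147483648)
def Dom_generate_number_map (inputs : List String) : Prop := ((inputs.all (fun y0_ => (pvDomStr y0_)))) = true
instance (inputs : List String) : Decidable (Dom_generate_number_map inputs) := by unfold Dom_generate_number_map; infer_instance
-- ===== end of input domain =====

-- B replaces A's accumulate-and-flush state machine by a span scan over maximal
-- digit runs (slice the run out, map each of its columns to it); same cost, simpler.

-- ===== PORT A =====
-- 'for coord in number_coords: numbers[coord] = number'
def pvFlush (d : PySem.Dict (Int × Int) String) (cd : List (Int × Int)) (nb : List Char) :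
    PySem.Dict (Int × Int) String :=
  cd.foldl (fun dd coord => dd.insert coord (String.mk nb)) d

-- the inner 'for j in range(len(inputs[i]))' loop; 'number' kept as its list of chars
def pvALoop (i : Int) : PySem.Dict (Int × Int) String → List Char → List (Int × Int) → Int →
    List Char → PySem.Dict (Int × Int) String × List Char × List (Int × Int)
  | d, nb, cd, _, [] => (d, nb, cd)
  | d, nb, cd, j, c :: rest =>
    if PySem.Chars.isdigit c then
      pvALoop i d (nb ++ [c]) (cd ++ [(i, j)]) (j + 1) rest
    else if c == '.' then
      (if nb ≠ [] then pvALoop i (pvFlush d cd nb) [] [] (j + 1) rest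
       else pvALoop i d nb cd (j + 1) rest)
    else
      (if nb ≠ [] then pvALoop i (pvFlush d cd nb) [] [] (j + 1) rest
       else pvALoop i d nb cd (j + 1) rest)

-- one row: run the loop, then the trailing 'if number != "": flush'
def pvARow (i : Int) (row : String) (d : PySem.Dict (Int × Int) String) :
    PySem.Dict (Int × Int) String :=
  let r := pvALoop i d [] [] 0 row.toList
  if r.2.1 ≠ [] then pvFlush r.1 r.2.2 r.2.1 else r.1

def generate_number_map (inputs : List String) : List (Int × Int × String) :=
  ((PySem.List.enumerate inputs 0).foldl (fun d p => pvARow p.1 p.2 d)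
      PySem.Dict.empty).items.map (fun q => (q.1.1, q.1.2, q.2))

-- ===== PORT B =====
-- the inner 'while k < n and row[k].isdigit(): k += 1' as maximal digit prefix + rest
def pvSpan : List Char → List Char × List Char
  | [] => ([], [])
  | c :: cs =>
    if PySem.Chars.isdigit c then ((c :: (pvSpan cs).1), (pvSpan cs).2) else ([], c :: cs)

theorem pvSpan_snd_le (cs : List Char) : (pvSpan cs).2.length ≤ cs.length := by
  induction cs with
  | nil => simp [pvSpan]
  | cons c cs ih =>
    simp only [pvSpan]
    split
    · exact Nat.le_trans ih (Nat.le_succ _)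
    · simp

-- the 'while j < n' scan of one row, carrying the unprocessed suffix alongside j
def pvBRow (i : Int) : Int → List Char → PySem.Dict (Int × Int) String →
    PySem.Dict (Int × Int) String
  | _, [], d => d
  | j, c :: rest, d =>
    if PySem.Chars.isdigit c then
      pvBRow i (j + ((c :: (pvSpan rest).1).length : Int)) (pvSpan rest).2
        ((PySem.List.pyRange j (j + ((c :: (pvSpan rest).1).length : Int)) 1).foldl
          (fun dd cc => dd.insert (i, cc) (String.mk (c :: (pvSpan rest).1))) d)
    else pvBRow i (j + 1) rest d
  termination_by _ cs _ => cs.length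
  decreasing_by
  · exact Nat.lt_succ_of_le (pvSpan_snd_le rest)
  · simp

def generate_number_map_alt (inputs : List String) : List (Int × Int × String) :=
  ((PySem.List.enumerate inputs 0).foldl (fun d p => pvBRow p.1 0 p.2.toList d)
      PySem.Dict.empty).items.map (fun q => (q.1.1, q.1.2, q.2))

-- ===== PRECONDITION & SPEC =====
def Spec_generate_number_map (inputs : List String) (out : List (Int × Int × String)) : Prop := out = generate_number_map_alt inputs
instance (inputs : List String) (out : List (Int × Int × String)) : Decidable (Spec_generate_number_map inputs out) := by unfold Spec_generate_number_map; infer_instance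

-- ===== CLAIM (what is proved, stated in full; the proofs are below) =====
def Claim_equal_generate_number_map : Prop := ∀ (inputs : List String), Dom_generate_number_map inputs → Spec_generate_number_map inputs (generate_number_map inputs)

-- ===== LEMMAS AND PROOFS =====

-- one B step, restated through pvSpan (case analysis on the head)
theorem pvBRow_step (i j : Int) (cs : List Char) (d : PySem.Dict (Int × Int) String) :
    pvBRow i j cs d =
      pvBRow i (j + ((pvSpan cs).1.length : Int)) (pvSpan cs).2
        (if (pvSpan cs).1 ≠ [] then
          pvFlush d ((PySem.List.pyRange j (j + ((pvSpan cs).1.length : Int)) 1).map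
            (fun cc => (i, cc))) (pvSpan cs).1
        else d) := by
  cases cs with
  | nil =>
    simp [pvBRow, pvSpan]
  | cons c rest =>
    by_cases hd : PySem.Chars.isdigit c
    · simp only [pvBRow, pvSpan, hd, if_pos, ne_eq, reduceCtorEq,
        not_false_eq_true, pvFlush, List.foldl_map]
    · simp [pvBRow, pvSpan, hd]

-- A's loop result followed by the trailing flush
def pvAFinish (r : PySem.Dict (Int × Int) String × List Char × List (Int × Int)) :
    PySem.Dict (Int × Int) String :=
  if r.2.1 ≠ [] then pvFlush r.1 r.2.2 r.2.1 else r.1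

-- main invariant: finishing A's loop from pending state (nb, cd) equals B's span scan,
-- with the pending run completed by the leading digit span of the remaining input
theorem pvMain (i : Int) (cs : List Char) : ∀ (j : Int) (d : PySem.Dict (Int × Int) String)
    (nb : List Char) (cd : List (Int × Int)), (nb = [] → cd = []) →
    pvAFinish (pvALoop i d nb cd j cs) =
      pvBRow i (j + ((pvSpan cs).1.length : Int)) (pvSpan cs).2
        (if nb ++ (pvSpan cs).1 ≠ [] then
          pvFlush d (cd ++ (PySem.List.pyRange j (j + ((pvSpan cs).1.length : Int)) 1).map
            (fun cc => (i, cc))) (nb ++ (pvSpan cs).1)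
        else d) := by
  induction cs with
  | nil =>
    intro j d nb cd _
    simp [pvALoop, pvSpan, pvBRow, pvAFinish, PySem.List.pyRange_one_eq_nil (le_refl j)]
  | cons c rest ih =>
    intro j d nb cd hcd
    by_cases hd : PySem.Chars.isdigit c
    · have hih := ih (j + 1) d (nb ++ [c]) (cd ++ [(i, j)]) (by simp)
      simp only [pvALoop, hd, if_true]
      rw [hih]
      simp only [pvSpan, hd, if_true]
      have hn : (0 : Int) ≤ ((pvSpan rest).1.length : Int) := by positivity
      have harith : j + 1 + ((pvSpan rest).1.length : Int)
          = j + (((c :: (pvSpan rest).1).length : Nat) : Int) := by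
        simp only [List.length_cons]; push_cast; ring
      have hrange : PySem.List.pyRange j (j + (((c :: (pvSpan rest).1).length : Nat) : Int)) 1
          = j :: PySem.List.pyRange (j + 1) (j + (((c :: (pvSpan rest).1).length : Nat) : Int)) 1 := by
        apply PySem.List.pyRange_one_cons
        simp only [List.length_cons]; push_cast; omega
      rw [harith, hrange]
      simp
    · simp only [pvALoop, hd, if_false, Bool.false_eq_true, ite_self]
      by_cases hnb : nb = []
      · have : cd = [] := hcd hnb
        subst this; subst hnb
        have hih := ih (j + 1) d [] [] (fun _ => rfl)
        rw [if_neg (by simp), hih]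
        simp only [pvSpan, hd, if_false, Bool.false_eq_true, List.length_nil,
          Nat.cast_zero, add_zero, List.nil_append, List.append_nil, ne_eq,
          not_true_eq_false, not_false_eq_true]
        have h1 : pvBRow i j (c :: rest) d = pvBRow i (j + 1) rest d := by
          simp [pvBRow, hd]
        rw [h1]
        rw [pvBRow_step i (j + 1) rest d]
      · rw [if_pos hnb]
        have hih := ih (j + 1) (pvFlush d cd nb) [] [] (fun _ => rfl)
        rw [hih]
        simp only [pvSpan, hd, if_false, Bool.false_eq_true, List.length_nil,
          Nat.cast_zero, add_zero, List.nil_append, List.append_nil]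
        rw [if_pos hnb]
        rw [PySem.List.pyRange_one_eq_nil (le_refl j)]
        simp only [List.map_nil, List.append_nil]
        have h1 : pvBRow i j (c :: rest) (pvFlush d cd nb) = pvBRow i (j + 1) rest (pvFlush d cd nb) := by
          simp [pvBRow, hd]
        rw [h1]
        rw [pvBRow_step i (j + 1) rest (pvFlush d cd nb)]

theorem pvRow_eq (i : Int) (row : String) (d : PySem.Dict (Int × Int) String) :
    pvARow i row d = pvBRow i 0 row.toList d := by
  show pvAFinish (pvALoop i d [] [] 0 row.toList) = _
  rw [pvMain i row.toList 0 d [] [] (fun _ => rfl)]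
  rw [pvBRow_step i 0 row.toList d]
  simp

-- ===== VERDICT (by name: the statement is the Claim_ definition above) =====
theorem generate_number_map_spec : Claim_equal_generate_number_map := by
  intro inputs _
  unfold Spec_generate_number_map generate_number_map generate_number_map_alt
  have h : ∀ (l : List (Int × String)) (d : PySem.Dict (Int × Int) String),
      l.foldl (fun d p => pvARow p.1 p.2 d) d = l.foldl (fun d p => pvBRow p.1 0 p.2.toList d) d := by
    intro l
    induction l with
    | nil => intro d; rfl
    | cons p l ih => intro d; simp [List.foldl_cons, pvRow_eq]
  rw [h]
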